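-- pv_equiv track=rewrite | github.com/YannDubs/Invariant-Self-Supervised-Learning | utils/helpers.py | update_prepending
-- ===== SOURCE A (Python) =====
-- def update_prepending(to_update, new):
--     """Update a dictionary with another. the difference with .update, is that it puts the new keys
--     before the old ones (prepending)."""
--     # makes sure don't update arguments
--     to_update = to_update.copy()
--     new = new.copy()
--
--     # updated with the new values appended
--     to_update.update(new)
--
--     # remove all the new values => just updated old values
--     to_update = {k: v for k, v in to_update.items() if k not in new}
--
--     # keep only values that ought to be prepended
--     new = {k: v for k, v in new.items() if k not in to_update}
--
--     # update the new dict with old one => new values are at the beginning (prepended)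
--     new.update(to_update)
--
--     return new
-- ===== SOURCE B (Python) =====
-- def update_prepending(to_update, new):
--     """Update a dictionary with another, putting the new keys before the old ones."""
--     # First insertion fixes the order (new's keys first, then old-only keys in
--     # to_update's order); the last unpacking of new overwrites the shared keys
--     # back to new's values.  No loops, no membership tests, inputs untouched.
--     return {**new, **to_update, **new}
-- ===== Notes on version B (the rewrite author's own statement) =====
-- stated objective: idiomatic
-- what changed: Replaces A's copy/update/two-dict-comprehensions/remerge sequence with a single dict display {**new, **to_update, **new}: insertion order is fixed by the first occurrence of each key and the final unpacking of new restores new's values, so no loops or membership filters are needed.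
import Mathlib
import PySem

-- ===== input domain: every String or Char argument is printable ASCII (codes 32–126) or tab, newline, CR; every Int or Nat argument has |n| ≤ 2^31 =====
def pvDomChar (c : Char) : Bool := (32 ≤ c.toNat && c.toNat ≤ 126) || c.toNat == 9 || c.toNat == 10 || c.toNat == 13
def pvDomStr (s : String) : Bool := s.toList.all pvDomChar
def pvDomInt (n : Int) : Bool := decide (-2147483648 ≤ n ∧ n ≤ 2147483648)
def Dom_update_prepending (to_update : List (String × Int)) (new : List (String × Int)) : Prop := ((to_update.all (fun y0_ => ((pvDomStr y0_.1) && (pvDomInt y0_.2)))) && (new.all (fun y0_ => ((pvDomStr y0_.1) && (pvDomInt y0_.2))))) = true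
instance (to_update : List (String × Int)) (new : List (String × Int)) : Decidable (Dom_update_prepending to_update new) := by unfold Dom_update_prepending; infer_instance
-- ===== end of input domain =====

-- B replaces A's copy/update/two-comprehensions/remerge sequence with the single dict display
-- {**new, **to_update, **new} (objective: idiomatic).

-- ===== PORT A =====
-- Literal transliteration of A. The dict arguments arrive as association lists and are read as
-- Python dicts via PySem.Dict.ofList. A dict comprehension over a dict's items is ported as
-- Dict.mk of the filtered items list, exact because a dict's items carry unique keys.
def update_prepending (to_update : List (String × Int)) (new : List (String × Int)) : List (String × Int) :=
  let tu := PySem.Dict.ofList to_update        -- to_update.copy()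
  let nw := PySem.Dict.ofList new              -- new.copy()
  let tu1 := tu.update nw.items                -- to_update.update(new)
  let tu2 : PySem.Dict String Int :=
    PySem.Dict.mk (tu1.items.filter (fun p => !(nw.contains p.1)))   -- {k: v for k, v in to_update.items() if k not in new}
  let nw1 : PySem.Dict String Int :=
    PySem.Dict.mk (nw.items.filter (fun p => !(tu2.contains p.1)))   -- {k: v for k, v in new.items() if k not in to_update}
  (nw1.update tu2.items).items                 -- new.update(to_update); return new

-- ===== PORT B =====
-- Literal transliteration of B (Source B): the dict display {**new, **to_update, **new} builds a
-- fresh dict and unpacks the three mappings into it in order (each unpacking = update with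
-- that dict's items, exactly Python's semantics for **).
def update_prepending_alt (to_update : List (String × Int)) (new : List (String × Int)) : List (String × Int) :=
  let nw := PySem.Dict.ofList new
  let tu := PySem.Dict.ofList to_update
  ((((PySem.Dict.empty : PySem.Dict String Int).update nw.items).update tu.items).update nw.items).items

-- ===== PRECONDITION & SPEC =====
def Spec_update_prepending (to_update : List (String × Int)) (new : List (String × Int)) (out : List (String × Int)) : Prop := out = update_prepending_alt to_update new
instance (to_update : List (String × Int)) (new : List (String × Int)) (out : List (String × Int)) : Decidable (Spec_update_prepending to_update new out) := by unfold Spec_update_prepending; infer_instance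

-- ===== CLAIM (what is proved, stated in full; the proofs are below) =====
def Claim_equal_update_prepending : Prop := ∀ (to_update : List (String × Int)) (new : List (String × Int)), Dom_update_prepending to_update new → Spec_update_prepending to_update new (update_prepending to_update new)

-- ===== LEMMAS AND PROOFS =====

-- a key absent from the fst-projection looks up to none
theorem lookup_none (k : String) :
    ∀ (l : List (String × Int)), k ∉ l.map Prod.fst → l.lookup k = none := by
  intro l
  induction l with
  | nil => intro _; rfl
  | cons p l ih =>
    intro h
    simp only [List.map_cons, List.mem_cons] at h
    rw [not_or] at h
    have hb : (k == p.1) = false := by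
      exact beq_eq_false_iff_ne.mpr h.1
    simp [List.lookup, hb, ih h.2]

-- with distinct keys, a member's key looks up to its value
theorem lookup_self :
    ∀ (l : List (String × Int)), (l.map Prod.fst).Nodup → ∀ q ∈ l, l.lookup q.1 = some q.2 := by
  intro l
  induction l with
  | nil => intro _ q hq; cases hq
  | cons p l ih =>
    intro hnd q hq
    simp only [List.map_cons, List.nodup_cons] at hnd
    rcases List.mem_cons.mp hq with h | h
    · subst h; simp [List.lookup]
    · have hne : q.1 ≠ p.1 := by
        intro he
        exact hnd.1 (he ▸ List.mem_map_of_mem h)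
      simp [List.lookup, beq_eq_false_iff_ne.mpr hne, ih hnd.2 q h]

-- the items of an insert loop over a list with distinct keys: old entries overwritten
-- where the list hits them, fresh entries appended in list order
theorem foldl_insert_items :
    ∀ (l : List (String × Int)) (d : PySem.Dict String Int), (l.map Prod.fst).Nodup →
    (l.foldl (fun d p => d.insert p.1 p.2) d).items
      = d.items.map (fun q => match l.lookup q.1 with | some v => (q.1, v) | none => q)
        ++ l.filter (fun p => !d.contains p.1) := by
  intro l
  induction l with
  | nil =>
    intro d _
    simp
  | cons p l ih =>
    intro d hnd
    simp only [List.map_cons, List.nodup_cons] at hnd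
    have hp : p.1 ∉ l.map Prod.fst := hnd.1
    rw [List.foldl_cons, ih _ hnd.2]
    have hfl : ∀ q ∈ l, ((PySem.Dict.insert d p.1 p.2).contains q.1) = d.contains q.1 := by
      intro q hq
      rw [PySem.Dict.contains_insert]
      have : (q.1 == p.1) = false :=
        beq_eq_false_iff_ne.mpr (fun he => hp (he ▸ List.mem_map_of_mem hq))
      simp [this]
    have hfilter :
        l.filter (fun q => !((PySem.Dict.insert d p.1 p.2).contains q.1))
          = l.filter (fun q => !d.contains q.1) := by
      apply List.filter_congr
      intro q hq
      rw [hfl q hq]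
    by_cases hc : d.contains p.1 = true
    · rw [PySem.Dict.items_insert_of_contains _ _ hc, List.map_map, hfilter]
      congr 1
      · apply List.map_congr_left
        intro q _
        simp only [Function.comp_apply]
        by_cases hb : (q.1 == p.1) = true
        · have hqe : q.1 = p.1 := eq_of_beq hb
          simp [List.lookup, lookup_none p.1 l hp, hqe]
        · simp only [hb]
          simp [List.lookup, hb]
      · simp [hc]
    · have hc' : d.contains p.1 = false := by
        simpa using hc
      rw [PySem.Dict.items_insert_of_not_contains _ _ hc', List.map_append, hfilter]
      have hone : (fun q => match l.lookup q.1 with | some v => (q.1, v) | none => q) p = p := by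
        simp [lookup_none p.1 l hp]
      have hmap : ∀ q ∈ d.items,
          (fun q => match l.lookup q.1 with | some v => (q.1, v) | none => q) q
          = (fun q => match (p :: l).lookup q.1 with | some v => (q.1, v) | none => q) q := by
        intro q hq
        have hqk : d.contains q.1 = true :=
          (PySem.Dict.contains_iff_mem_keys ..).mpr (PySem.Dict.mem_keys_of_mem_items d hq)
        have hne : (q.1 == p.1) = false := by
          apply beq_eq_false_iff_ne.mpr
          intro he
          rw [he] at hqk
          exact Bool.false_ne_true (hc'.symm.trans hqk)
        simp [List.lookup, hne]
      rw [List.map_congr_left hmap]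
      simp [hc', hone]

-- A-side: overwriting the value at a key the filter drops does not change the filtered items.
theorem filter_map_overwrite (c : String → Bool) (k : String) (v : Int) (hk : c k = true) :
    ∀ (its : List (String × Int)),
    (its.map (fun q => if q.1 == k then (k, v) else q)).filter (fun q => !c q.1)
      = its.filter (fun q => !c q.1) := by
  intro its
  induction its with
  | nil => rfl
  | cons q its ih =>
    simp only [List.map_cons, List.filter_cons]
    by_cases h : (q.1 == k) = true
    · have hq : q.1 = k := eq_of_beq h
      rw [ih]
      simp [hk, hq]
    · rw [ih, if_neg h]

-- A-side: filtering away every key touched by an insert loop leaves the start dict's filtered items.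
theorem items_foldl_insert_filter_not (c : String → Bool) :
    ∀ (l : List (String × Int)) (d : PySem.Dict String Int),
    (∀ p ∈ l, c p.1 = true) →
    ((l.foldl (fun d p => d.insert p.1 p.2) d).items).filter (fun p => !c p.1)
      = d.items.filter (fun p => !c p.1) := by
  intro l
  induction l with
  | nil => intro d _; rfl
  | cons p l ih =>
    intro d hc
    have hp : c p.1 = true := hc p (List.mem_cons_self ..)
    rw [List.foldl_cons, ih _ (fun q hq => hc q (List.mem_cons_of_mem _ hq))]
    rw [PySem.Dict.items_insert]
    by_cases h : d.contains p.1 = true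
    · simp only [h, if_true]
      exact filter_map_overwrite c p.1 p.2 hp d.items
    · simp [h, List.filter_append, hp]

theorem update_prepending_eq (to_update new : List (String × Int)) :
    update_prepending to_update new = update_prepending_alt to_update new := by
  unfold update_prepending update_prepending_alt
  simp only []
  set tu := PySem.Dict.ofList to_update with htu
  set nw := PySem.Dict.ofList new with hnw
  have hnwnd : (nw.items.map Prod.fst).Nodup := PySem.Dict.nodup_keys_ofList (ν := Int) new
  have htund : (tu.items.map Prod.fst).Nodup := PySem.Dict.nodup_keys_ofList (ν := Int) to_update
  -- the common filtered old-only items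
  set rest := tu.items.filter (fun p => !(nw.contains p.1)) with hrest
  have hmemc : ∀ p ∈ nw.items, nw.contains p.1 = true := by
    intro p hp
    exact (PySem.Dict.contains_iff_mem_keys ..).mpr (PySem.Dict.mem_keys_of_mem_items nw hp)
  -- every entry of rest has a key not in nw
  have hrest_not : ∀ q ∈ rest, nw.contains q.1 = false := by
    intro q hq
    have := List.of_mem_filter hq
    simpa using this
  -- keys of rest are distinct (sublist of tu's distinct keys)
  have hnodup : (rest.map Prod.fst).Nodup := by
    have : (rest.map Prod.fst).Sublist (tu.items.map Prod.fst) :=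
      (List.filter_sublist).map Prod.fst
    exact htund.sublist this
  -- ===== A's side reduces to nw.items ++ rest =====
  have h1 : (PySem.Dict.update tu nw.items).items.filter (fun p => !(nw.contains p.1)) = rest :=
    items_foldl_insert_filter_not (fun k => nw.contains k) nw.items tu hmemc
  have h2 : nw.items.filter
      (fun p => !((PySem.Dict.mk rest : PySem.Dict String Int).contains p.1)) = nw.items := by
    apply List.filter_eq_self.mpr
    intro p hp
    have hcontains : (PySem.Dict.mk rest : PySem.Dict String Int).contains p.1 = false := by
      rw [PySem.Dict.contains_mk]
      apply List.any_eq_false.mpr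
      intro q hq hbeq
      have : q.1 = p.1 := eq_of_beq hbeq
      have h1' := hrest_not q hq
      have h2' := hmemc p hp
      rw [this] at h1'
      rw [h1'] at h2'
      exact Bool.false_ne_true h2'
    simp [hcontains]
  rw [h1, h2]
  -- A appends the fresh old-only entries to nw.items
  have hfreshA : (PySem.Dict.update (PySem.Dict.mk nw.items) rest).items
      = nw.items ++ rest := by
    show (rest.foldl (fun d p => d.insert p.1 p.2) (PySem.Dict.mk nw.items)).items
        = nw.items ++ rest
    have h := PySem.Dict.items_foldl_insert_fresh rest Prod.fst Prod.snd
      (PySem.Dict.mk nw.items) (fun a ha => hrest_not a ha) hnodup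
    simpa using h
  -- B: the three unpackings
  have hB : ((((PySem.Dict.empty : PySem.Dict String Int).update nw.items).update
      tu.items).update nw.items).items = nw.items ++ rest := by
    set d1 := (PySem.Dict.empty : PySem.Dict String Int).update nw.items with hd1
    have hd1items : d1.items = nw.items := by
      show ((nw.items.foldl (fun d p => d.insert p.1 p.2)
          (PySem.Dict.empty : PySem.Dict String Int))).items = nw.items
      have h := PySem.Dict.items_foldl_insert_fresh nw.items Prod.fst Prod.snd
        (PySem.Dict.empty : PySem.Dict String Int)
        (fun a _ => PySem.Dict.contains_empty a.1) hnwnd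
      simpa using h
    have hcont1 : ∀ k, d1.contains k = nw.contains k := by
      intro k
      rw [PySem.Dict.contains_eq_decide_mem_keys, PySem.Dict.contains_eq_decide_mem_keys]
      simp only [PySem.Dict.keys, hd1items]
      rfl
    set d2 := d1.update tu.items with hd2
    have hd2items : d2.items
        = nw.items.map (fun q => match tu.items.lookup q.1 with | some v => (q.1, v) | none => q)
          ++ rest := by
      show ((tu.items.foldl (fun d p => d.insert p.1 p.2) d1)).items = _
      rw [foldl_insert_items tu.items d1 htund, hd1items]
      congr 1
      apply List.filter_congr
      intro q _
      rw [hcont1 q.1]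
    have hfstF : ∀ q : String × Int,
        ((fun q : String × Int => match tu.items.lookup q.1 with
          | some v => (q.1, v) | none => q) q).1 = q.1 := by
      intro q
      cases h : tu.items.lookup q.1 <;> simp only [h]
    have hcont2 : ∀ p ∈ nw.items, d2.contains p.1 = true := by
      intro p hp
      apply (PySem.Dict.contains_iff_mem_keys ..).mpr
      show p.1 ∈ d2.items.map Prod.fst
      rw [hd2items]
      refine List.mem_map.mpr ⟨(fun q : String × Int => match tu.items.lookup q.1 with
        | some v => (q.1, v) | none => q) p, List.mem_append_left _ (List.mem_map_of_mem hp), ?_⟩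
      exact hfstF p
    show ((nw.items.foldl (fun d p => d.insert p.1 p.2) d2)).items = nw.items ++ rest
    rw [foldl_insert_items nw.items d2 hnwnd]
    have hfilnil : nw.items.filter (fun p => !d2.contains p.1) = [] := by
      apply List.filter_eq_nil_iff.mpr
      intro p hp
      simp [hcont2 p hp]
    rw [hfilnil, List.append_nil, hd2items, List.map_append, List.map_map]
    congr 1
    · calc nw.items.map _
          = nw.items.map id := by
            apply List.map_congr_left
            intro q hq
            simp only [Function.comp_apply]
            have hself : nw.items.lookup q.1 = some q.2 := lookup_self nw.items hnwnd q hq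
            cases h : tu.items.lookup q.1 with
            | none => simp [h, hself]
            | some v => simp [h, hself]
        _ = nw.items := List.map_id _
    · conv_rhs => rw [← List.map_id rest]
      apply List.map_congr_left
      intro q hq
      simp only [id]
      have hq1 : nw.contains q.1 = false := hrest_not q hq
      have : q.1 ∉ nw.items.map Prod.fst := by
        intro hm
        have : nw.contains q.1 = true := (PySem.Dict.contains_iff_mem_keys ..).mpr hm
        rw [hq1] at this
        exact Bool.false_ne_true this
      simp [lookup_none q.1 nw.items this]
  rw [hfreshA, hB]

-- ===== VERDICT (by name: the statement is the Claim_ definition above) =====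
theorem update_prepending_spec : Claim_equal_update_prepending := by
  intro to_update new _
  exact update_prepending_eq to_update new
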